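-- pv_equiv track=rewrite | github.com/bavocadob/TIL | 99_algorithm/BOJ/40weeks/12318.py | solve
-- ===== SOURCE A (Python) =====
-- vowels = {"a", "e", "i", "o", "u"}
--
-- def solve(s, n):
--     n_value = 0
--     consecutive = 0
--     last_pos = -1
--
--     for i, char in enumerate(s):
--         if char in vowels:
--             consecutive = 0
--         else:
--             consecutive += 1
--
--         if consecutive >= n:
--             last_pos = i - n + 1
--
--         if last_pos >= 0:
--             n_value += last_pos + 1
--
--     return n_value
-- ===== SOURCE B (Python) =====
-- vowels = {"a", "e", "i", "o", "u"}
--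
-- def solve(s, n):
--     # Pass 1: collect "trigger" indices i where the consonant run ending at i
--     # reaches length >= n.
--     triggers = []
--     r = 0
--     for i, ch in enumerate(s):
--         r = 0 if ch in vowels else r + 1
--         if r >= n:
--             triggers.append(i)
--     # Pass 2: between trigger i and the next trigger j (or end of string),
--     # every position contributes (i - n + 2), so add it span-wise.
--     total = 0
--     for i, j in zip(triggers, triggers[1:] + [len(s)]):
--         total += (i - n + 2) * (j - i)
--     return total
-- ===== Notes on version B (the rewrite author's own statement) =====
-- stated objective: alternative
-- what changed: A accumulates last_pos+1 at every character of one stateful loop; B first collects the list of trigger indices (positions where the consonant run reaches n) and then sums (i-n+2)*(span to the next trigger or end of string) span-wise over that list.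
import Mathlib
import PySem

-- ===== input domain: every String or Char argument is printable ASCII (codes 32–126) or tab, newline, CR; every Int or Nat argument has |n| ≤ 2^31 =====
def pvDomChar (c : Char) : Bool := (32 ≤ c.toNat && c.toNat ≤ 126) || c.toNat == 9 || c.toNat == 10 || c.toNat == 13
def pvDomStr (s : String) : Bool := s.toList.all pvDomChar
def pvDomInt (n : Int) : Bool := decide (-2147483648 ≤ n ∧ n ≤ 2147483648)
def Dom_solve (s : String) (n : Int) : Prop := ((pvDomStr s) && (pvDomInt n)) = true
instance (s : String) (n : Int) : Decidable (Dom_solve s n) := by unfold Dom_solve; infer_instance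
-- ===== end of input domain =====

-- B replaces A's per-position accumulation by a trigger-index list and a span-wise
-- (value × span) summation: a different decomposition, same O(len s) cost.

def pyVowels : List Char := ['a', 'e', 'i', 'o', 'u']

-- ===== PORT A =====
def solve (s : String) (n : Int) : Int :=
  ((PySem.List.enumerate s.toList 0).foldl
    (fun (st : Int × Int × Int) p =>
      let c' := if p.2 ∈ pyVowels then 0 else st.2.1 + 1
      let l' := if c' ≥ n then p.1 - n + 1 else st.2.2
      let v' := if l' ≥ 0 then st.1 + (l' + 1) else st.1
      (v', c', l'))
    (0, 0, -1)).1

-- ===== PORT B =====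
def solve_alt (s : String) (n : Int) : Int :=
  let triggers :=
    ((PySem.List.enumerate s.toList 0).foldl
      (fun (st : Int × List Int) p =>
        let r := if p.2 ∈ pyVowels then 0 else st.1 + 1
        (r, if r ≥ n then st.2 ++ [p.1] else st.2))
      (0, [])).2
  (triggers.zip (triggers.drop 1 ++ [PySem.Str.len s])).foldl
    (fun total p => total + (p.1 - n + 2) * (p.2 - p.1)) 0

-- ===== PRECONDITION & SPEC =====
def Spec_solve (s : String) (n : Int) (out : Int) : Prop := out = solve_alt s n
instance (s : String) (n : Int) (out : Int) : Decidable (Spec_solve s n out) := by unfold Spec_solve; infer_instance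

-- ===== CLAIM (what is proved, stated in full; the proofs are below) =====
def Claim_equal_solve : Prop := ∀ (s : String) (n : Int), Dom_solve s n → Spec_solve s n (solve s n)

-- ===== LEMMAS AND PROOFS =====

-- trigger indices of the suffix, starting at index k with incoming run length c
def pvTrig (n : Int) : List Char → Int → Int → List Int
  | [], _, _ => []
  | ch :: cs, k, c =>
    let c' := if ch ∈ pyVowels then 0 else c + 1
    if c' ≥ n then k :: pvTrig n cs (k + 1) c' else pvTrig n cs (k + 1) c'

-- span-wise sum over a trigger list with final boundary L
def pvBSum (n L : Int) : List Int → Int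
  | [] => 0
  | i :: ts => (i - n + 2) * (ts.headD L - i) + pvBSum n L ts

theorem pvAFold (n : Int) (cs : List Char) (k v c l : Int)
    (hk : 0 ≤ k) (hc0 : 0 ≤ c) (hck : c ≤ k) :
    ((PySem.List.enumerate cs k).foldl
      (fun (st : Int × Int × Int) p =>
        let c' := if p.2 ∈ pyVowels then 0 else st.2.1 + 1
        let l' := if c' ≥ n then p.1 - n + 1 else st.2.2
        let v' := if l' ≥ 0 then st.1 + (l' + 1) else st.1
        (v', c', l'))
      (v, c, l)).1
    = v + (if 0 ≤ l then (l + 1) * ((pvTrig n cs k c).headD (k + cs.length) - k) else 0)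
        + pvBSum n (k + cs.length) (pvTrig n cs k c) := by
  induction cs generalizing k v c l with
  | nil =>
      simp [PySem.List.enumerate_nil, pvTrig, pvBSum]
  | cons ch cs ih =>
      rw [PySem.List.enumerate_cons]
      simp only [List.foldl_cons]
      by_cases hv : ch ∈ pyVowels
      · by_cases ht : (0 : Int) ≥ n
        · -- vowel, trigger (c' = 0 ≥ n)
          have h0 : (0 : Int) ≤ k - n + 1 := by omega
          simp only [pvTrig, hv, if_pos ht, if_true, ht]
          rw [ih (k + 1) _ 0 (k - n + 1) (by omega) (by omega) (by omega)]
          simp only [if_pos h0, List.headD_cons, pvBSum]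
          push_cast
          by_cases hl : (0 : Int) ≤ l <;> simp [hv, ht, h0, hl] <;> ring
        · -- vowel, no trigger
          simp only [pvTrig, hv, if_true, if_neg ht]
          rw [ih (k + 1) _ 0 l (by omega) le_rfl (by omega)]
          push_cast
          by_cases hl : (0 : Int) ≤ l <;> simp [hv, ht, hl] <;> ring
      · by_cases ht : c + 1 ≥ n
        · -- consonant, trigger
          have h0 : (0 : Int) ≤ k - n + 1 := by omega
          simp only [pvTrig, hv, if_false, if_pos ht]
          rw [ih (k + 1) _ (c + 1) (k - n + 1) (by omega) (by omega) (by omega)]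
          simp only [if_pos h0, List.headD_cons, pvBSum]
          push_cast
          by_cases hl : (0 : Int) ≤ l <;> simp [hv, ht, h0, hl] <;> ring
        · -- consonant, no trigger
          simp only [pvTrig, hv, if_false, if_neg ht]
          rw [ih (k + 1) _ (c + 1) l (by omega) (by omega) (by omega)]
          push_cast
          by_cases hl : (0 : Int) ≤ l <;> simp [hv, ht, hl] <;> ring

theorem pvTrigFold (n : Int) (cs : List Char) (k r : Int) (acc : List Int) :
    ((PySem.List.enumerate cs k).foldl
      (fun (st : Int × List Int) p =>
        let r := if p.2 ∈ pyVowels then 0 else st.1 + 1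
        (r, if r ≥ n then st.2 ++ [p.1] else st.2))
      (r, acc)).2 = acc ++ pvTrig n cs k r := by
  induction cs generalizing k r acc with
  | nil => simp [PySem.List.enumerate_nil, pvTrig]
  | cons ch cs ih =>
      rw [PySem.List.enumerate_cons]
      simp only [List.foldl_cons, pvTrig]
      by_cases hv : ch ∈ pyVowels
      · by_cases ht : (0 : Int) ≥ n <;> simp [hv, ht, ih] 
      · by_cases ht : r + 1 ≥ n <;> simp [hv, ht, ih]

theorem pvZipFold (n L : Int) (ts : List Int) (t0 : Int) :
    (ts.zip (ts.drop 1 ++ [L])).foldl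
      (fun total p => total + (p.1 - n + 2) * (p.2 - p.1)) t0
    = t0 + pvBSum n L ts := by
  induction ts generalizing t0 with
  | nil => simp [pvBSum]
  | cons i rest ih =>
      cases rest with
      | nil => simp [pvBSum]
      | cons j r' =>
          simp only [List.drop_succ_cons, List.drop_zero] at ih ⊢
          simp only [List.cons_append, List.zip_cons_cons, List.foldl_cons]
          rw [ih]
          simp only [pvBSum, List.headD_cons]
          ring

-- ===== VERDICT (by name: the statement is the Claim_ definition above) =====
theorem solve_spec : Claim_equal_solve := by
  intro s n _
  unfold Spec_solve solve solve_alt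
  rw [pvAFold n s.toList 0 0 0 (-1) le_rfl le_rfl le_rfl]
  rw [pvTrigFold n s.toList 0 0 []]
  rw [pvZipFold]
  simp [PySem.Str.len]
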